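-- pv_equiv track=rewrite | github.com/matiaslang/IntroToAI | Harjoitus4/Tehtava1/clustering.py | Choose_best_color
-- ===== SOURCE A (Python) =====
-- import copy
-- from itertools import permutations
--
-- def Choose_best_color(labels, orig_labels):
--     """
--     Tämä funktio valitsee klusteroiduille näytteille värin, joka on mahdollisimman lähellä alkuperäistä väriä
--     """
--     classes = list(set(labels))
--     combinations = list(permutations(classes, len(classes)))
--     accuracies = []
--     labels_array = []
--     for i in range(len(combinations)):
--         mod_labels = copy.deepcopy(labels)
--         for j in range(len(classes)):
--             mod_labels = [str(combinations[i][j]) if x==classes[j] else x for x in mod_labels]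
--         mod_labels = [int(i) for i in mod_labels]
--         count = 0
--         for k in range(len(mod_labels)):
--             if mod_labels[k] == orig_labels[k]:
--                 count += 1
--         accuracies.append(count)
--         labels_array.append(mod_labels)
--     ind = accuracies.index(max(accuracies))
--     return labels_array[ind]
-- ===== SOURCE B (Python) =====
-- def Choose_best_color(labels, orig_labels):
--     # Faster exact re-implementation: one pass builds a confusion counter
--     # conf[(class_index, orig_value)]; a recursive depth-first search then
--     # enumerates the permutations in the same lexicographic order, scoring
--     # each leaf in O(k) from the counter and keeping only the first best
--     # one, and the winning relabelling is materialised once at the end.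
--     classes = list(set(labels))
--     pos = {c: j for j, c in enumerate(classes)}
--     conf = {}
--     for x, y in zip(labels, orig_labels):
--         key = (pos[x], y)
--         conf[key] = conf.get(key, 0) + 1
--     state = [-1, None]  # best score so far, best permutation so far
--
--     def go(prefix, remaining):
--         if not remaining:
--             s = 0
--             for j, v in enumerate(prefix):
--                 s += conf.get((j, v), 0)
--             if s > state[0]:
--                 state[0] = s
--                 state[1] = list(prefix)
--             return
--         for i, x in enumerate(remaining):
--             go(prefix + [x], remaining[:i] + remaining[i + 1:])
--
--     go([], classes)
--     best = state[1]
--     return [best[pos[x]] for x in labels]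
-- ===== Notes on version B (the rewrite author's own statement) =====
-- stated objective: faster
-- what changed: Instead of materialising, rewriting (k comprehension passes with str/int round-trips) and storing a full relabelled copy of labels for every one of the k! permutations and then taking index(max), B builds a (class_index, orig_value) confusion counter in one pass over the input, runs a recursive depth-first search over the permutations that scores each leaf in O(k) from the counter and keeps only the first best one, and builds only the winning relabelling once.
import Mathlib
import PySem

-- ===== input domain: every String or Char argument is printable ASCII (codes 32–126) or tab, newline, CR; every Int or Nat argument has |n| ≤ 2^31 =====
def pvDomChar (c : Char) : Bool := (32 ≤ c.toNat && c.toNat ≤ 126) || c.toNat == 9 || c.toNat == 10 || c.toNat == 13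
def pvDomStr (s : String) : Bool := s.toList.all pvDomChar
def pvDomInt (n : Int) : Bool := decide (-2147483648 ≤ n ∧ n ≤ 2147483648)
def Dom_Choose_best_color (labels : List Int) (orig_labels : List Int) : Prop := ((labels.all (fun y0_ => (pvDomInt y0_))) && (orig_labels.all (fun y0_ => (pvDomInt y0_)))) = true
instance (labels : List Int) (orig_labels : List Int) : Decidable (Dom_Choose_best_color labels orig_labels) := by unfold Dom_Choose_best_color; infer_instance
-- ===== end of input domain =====

-- B replaces A's per-permutation full relabelling (k rewrite passes with str/int round-trips,
-- all k! relabelled lists stored, index(max) at the end) by a one-pass (class index, original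
-- label) confusion counter and a recursive depth-first search over the permutations that keeps
-- only the first best one; the winning relabelling is built once at the end.


-- ===== PORT A =====
-- Helpers shared by BOTH ports: a hand port of `list(set(labels))`, which both Pythons call.
--
-- PySem does not model CPython's set iteration order, and here the result can depend on it
-- (ties between permutations are broken by enumeration order over `classes`), so the CPython
-- int-set table is ported by hand, step for step after Objects/setobject.c. Exact for
-- |x| < 2^61 - 1, where hash(x) = x (hash(-1) = -2); a duplicate add never changes a CPython
-- set, so inserting the distinct elements in first-occurrence order reproduces
-- `list(set(labels))` exactly.

def pyHashInt (x : Int) : Int := if x = -1 then -2 else x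

def pvU64OfInt (h : Int) : UInt64 := (Int.toNat (h % (18446744073709551616 : Int))).toUInt64

-- first empty slot among table[j], table[j+1], …, table[j+n] (CPython's linear probes)
def pvFindEmpty (table : List (Option Int)) : Nat → Nat → Option Nat
  | j, 0 => if table.getD j (some 0) = none then some j else none
  | j, n+1 => if table.getD j (some 0) = none then some j else pvFindEmpty table (j+1) n

-- CPython's probe sequence: slots i..i+9 (when they fit), then i := i*5 + 1 + (perturb >>= 5).
-- The fuel only makes the search total; it is never exhausted (the table always has a free
-- slot and the recurrence visits every slot once perturb reaches 0).
def pvProbe : Nat → List (Option Int) → Int → UInt64 → UInt64 → Option (List (Option Int))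
  | 0, _, _, _, _ => none
  | fuel+1, table, key, perturb, i =>
    let mask := table.length - 1
    let probes := if i.toNat + 9 ≤ mask then 9 else 0
    match pvFindEmpty table i.toNat probes with
    | some j => some (table.set j (some key))
    | none =>
      let perturb' := perturb >>> 5
      let i' := (i * 5 + 1 + perturb') &&& UInt64.ofNat mask
      pvProbe fuel table key perturb' i'

-- `while (newsize <= minused) newsize <<= 1` (minused < 2^63, so 64 steps always suffice)
def pvGrow : Nat → Nat → Nat → Nat
  | 0, ns, _ => ns
  | f+1, ns, minused => if ns ≤ minused then pvGrow f (ns * 2) minused else ns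

def pvProbeKey (t : List (Option Int)) (k : Int) : Option (List (Option Int)) :=
  pvProbe (t.length + 20) t k (pvU64OfInt (pyHashInt k))
    (pvU64OfInt (pyHashInt k) &&& UInt64.ofNat (t.length - 1))

def pvResize (entries : List Int) (newsize : Nat) : Option (List (Option Int)) :=
  entries.foldl (fun acc k => acc.bind fun t => pvProbeKey t k) (some (List.replicate newsize none))

def pvSetAdd (st : List (Option Int) × Nat) (key : Int) : Option (List (Option Int) × Nat) :=
  let mask := st.1.length - 1
  match pvProbeKey st.1 key with
  | none => none
  | some t =>
    let fill' := st.2 + 1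
    if fill' * 5 ≥ mask * 3 then
      let minused := if fill' > 50000 then fill' * 2 else fill' * 4
      match pvResize (t.filterMap id) (pvGrow 64 8 minused) with
      | none => none
      | some t' => some (t', fill')
    else some (t, fill')

def pySetList (labels : List Int) : List Int :=
  let D := PySem.Set.ofList labels
  match D.foldl (fun acc x => acc.bind fun st => pvSetAdd st x) (some (List.replicate 8 none, 0)) with
  | some (t, _) => t.filterMap id
  | none => D  -- unreachable fuel guard; keeps the helper total

-- A-side helpers from here on.
-- itertools.permutations(xs, len(xs)), in itertools order (choose each index in order)
def permsFuel : Nat → List Int → List (List Int)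
  | 0, _ => [[]]
  | n+1, xs => (List.range xs.length).flatMap fun i =>
      (permsFuel n (xs.eraseIdx i)).map fun p => xs.getD i 0 :: p

def permsList (xs : List Int) : List (List Int) := permsFuel xs.length xs

-- the j-loop: mod_labels holds ints and strs while it runs; `Sum.inr v` models the string
-- str(v). Exact here: a str element is only ever (a) compared with an int by `==` (False in
-- Python; False for Sum.inr vs Sum.inl) and (b) mapped back by int(), and int(str(v)) = v
-- (never a ValueError).
def pvModPass (classes comb labels : List Int) : List (Int ⊕ Int) :=
  (List.range classes.length).foldl (fun m j =>
    m.map fun x => if x = Sum.inl (classes.getD j 0) then Sum.inr (comb.getD j 0) else x)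
    (labels.map Sum.inl)

-- mod_labels = [int(i) for i in mod_labels]
def pvModLabels (classes comb labels : List Int) : List Int :=
  (pvModPass classes comb labels).map fun x => match x with
    | Sum.inl n => n
    | Sum.inr v => v

-- the count loop; orig[k]: IndexError when orig is shorter than mod_labels, excluded by Pre_
def pvCount (modL orig : List Int) : Int :=
  (List.range modL.length).foldl (fun (c : Int) k =>
    if modL.getD k 0 = (PySem.List.pyGet? orig (k : Int)).getD 0 then c + 1 else c) 0

def Choose_best_color (labels : List Int) (orig_labels : List Int) : List Int :=
  let classes := pySetList labels
  let combinations := permsList classes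
  let rows := (List.range combinations.length).foldl (fun (st : List Int × List (List Int)) i =>
    let comb := combinations.getD i []
    let modL := pvModLabels classes comb labels
    let count := pvCount modL orig_labels
    (st.1 ++ [count], st.2 ++ [modL])) ([], [])
  let accuracies := rows.1
  let ind := (PySem.List.index? accuracies ((PySem.List.max? accuracies (fun y => y)).getD 0)).getD 0
  rows.2.getD ind []

-- ===== PORT B =====
-- pos = {c: j for j, c in enumerate(classes)}
def pvIndexDict (classes : List Int) : PySem.Dict Int Int :=
  (PySem.List.enumerate classes).foldl (fun d jc => d.insert jc.2 jc.1) PySem.Dict.empty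

-- the confusion-counter loop over zip(labels, orig_labels)
def pvConf (index : PySem.Dict Int Int) (labels orig : List Int) : PySem.Dict (Int × Int) Int :=
  (labels.zip orig).foldl (fun d xy =>
    let key := (index.getD xy.1 0, xy.2)
    d.insert key (d.getD key 0 + 1)) PySem.Dict.empty

-- the leaf scoring loop: s = sum over enumerate(prefix) of conf.get((j, v), 0)
def pvScore (conf : PySem.Dict (Int × Int) Int) (perm : List Int) : Int :=
  (PySem.List.enumerate perm).foldl (fun (s : Int) jv => s + conf.getD (jv.1, jv.2) 0) 0

-- go(prefix, remaining) with the mutated state list threaded through as a pair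
-- (best score so far, best permutation so far); the fuel is the recursion depth
-- len(remaining), which strictly decreases.
def pvGoF (conf : PySem.Dict (Int × Int) Int) :
    Nat → List Int → List Int → Int × Option (List Int) → Int × Option (List Int)
  | 0, pfx, _rem, st =>
    let s := pvScore conf pfx
    if s > st.1 then (s, some pfx) else st
  | n+1, pfx, rem, st =>
    (PySem.List.enumerate rem).foldl
      (fun st ix => pvGoF conf n (pfx ++ [ix.2]) (rem.eraseIdx ix.1.toNat) st) st

def pvGo (conf : PySem.Dict (Int × Int) Int) (pfx rem : List Int)
    (st : Int × Option (List Int)) : Int × Option (List Int) :=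
  pvGoF conf rem.length pfx rem st

def Choose_best_color_alt (labels : List Int) (orig_labels : List Int) : List Int :=
  let classes := pySetList labels
  let pos := pvIndexDict classes
  let conf := pvConf pos labels orig_labels
  let final := pvGo conf [] classes (-1, none)
  -- final.2 = some _ always: the search reaches at least one leaf and every score ≥ 0 > -1
  labels.map fun x => (final.2.getD []).getD (pos.getD x 0).toNat 0

-- ===== PRECONDITION & SPEC =====
-- A indexes orig_labels at every position of labels: IndexError (excluded) when orig_labels is shorter.
def Pre_Choose_best_color (labels : List Int) (orig_labels : List Int) : Prop :=
  labels.length ≤ orig_labels.length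
instance (labels : List Int) (orig_labels : List Int) : Decidable (Pre_Choose_best_color labels orig_labels) := by unfold Pre_Choose_best_color; infer_instance

def pvWitness_Choose_best_color : List Int × List Int := ([2, 0, 1, 0], [1, 0, 1, 0])

def Spec_Choose_best_color (labels : List Int) (orig_labels : List Int) (out : List Int) : Prop := out = Choose_best_color_alt labels orig_labels
instance (labels : List Int) (orig_labels : List Int) (out : List Int) : Decidable (Spec_Choose_best_color labels orig_labels out) := by unfold Spec_Choose_best_color; infer_instance

-- ===== CLAIM (what is proved, stated in full; the proofs are below) =====
def Claim_equal_Choose_best_color : Prop := ∀ (labels : List Int) (orig_labels : List Int), Dom_Choose_best_color labels orig_labels → Pre_Choose_best_color labels orig_labels → Spec_Choose_best_color labels orig_labels (Choose_best_color labels orig_labels)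

-- ===== LEMMAS AND PROOFS =====

-- ---- notions the proof factors both ports through ----

-- the relabelling a permutation `comb` of `classes` induces
def pvMapv (classes comb : List Int) (x : Int) : Int := comb.getD (classes.idxOf x) 0

-- the accuracy of that relabelling against orig
def pvMatchN (classes comb labels orig : List Int) : Nat :=
  (labels.zip orig).countP (fun p => pvMapv classes comb p.1 == p.2)

-- ---- pySetList is the distinct elements of labels ----

theorem fm_set_none {t : List (Option Int)} {r : Nat} {k : Int}
    (h : t[r]? = some none) :
    ((t.set r (some k)).filterMap id).Perm (k :: t.filterMap id) := by
  induction t generalizing r with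
  | nil => simp at h
  | cons a tl ih =>
    cases r with
    | zero =>
      simp at h; subst h
      simp
    | succ r =>
      simp at h
      have := ih h
      cases a with
      | none => simpa [List.filterMap_cons] using this
      | some v =>
        simp only [List.set_cons_succ, List.filterMap_cons, id]
        exact (this.cons v).trans (List.Perm.swap k v _)


theorem findEmpty_spec {t : List (Option Int)} {j n r : Nat}
    (h : pvFindEmpty t j n = some r) : t[r]? = some none := by
  induction n generalizing j with
  | zero =>
    unfold pvFindEmpty at h
    split at h
    · rename_i he
      cases h
      have hr : t.getD r (some 0) = none := he
      rw [List.getD_eq_getElem?_getD] at hr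
      cases hg : t[r]? with
      | none => simp [hg] at hr
      | some v => simp [hg] at hr; simp [hr]
    · cases h
  | succ n ih =>
    unfold pvFindEmpty at h
    split at h
    · rename_i he
      cases h
      rw [List.getD_eq_getElem?_getD] at he
      cases hg : t[r]? with
      | none => simp [hg] at he
      | some v => simp [hg] at he; simp [he]
    · exact ih h


theorem probe_entries {fuel : Nat} {t t' : List (Option Int)} {k : Int} {p i : UInt64}
    (h : pvProbe fuel t k p i = some t') :
    (t'.filterMap id).Perm (k :: t.filterMap id) := by
  induction fuel generalizing p i with
  | zero => simp [pvProbe] at h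
  | succ fuel ih =>
    unfold pvProbe at h
    simp only at h
    split at h
    · rename_i j hj
      cases h
      exact fm_set_none (findEmpty_spec hj)
    · exact ih h


theorem probeKey_entries {t t' : List (Option Int)} {k : Int}
    (h : pvProbeKey t k = some t') :
    (t'.filterMap id).Perm (k :: t.filterMap id) := probe_entries h

theorem fold_bind_none {α β : Type} (f : α → β → Option α) (l : List β) :
    l.foldl (fun acc x => acc.bind fun st => f st x) none = none := by
  induction l with
  | nil => rfl
  | cons a l ih => simpa using ih


theorem resize_entries_aux (es : List Int) : ∀ (t0 t' : List (Option Int)),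
    es.foldl (fun acc k => acc.bind fun t => pvProbeKey t k) (some t0) = some t' →
    (t'.filterMap id).Perm (es ++ t0.filterMap id) := by
  induction es with
  | nil => intro t0 t' h; cases h; simp
  | cons e es ih =>
    intro t0 t' h
    simp only [List.foldl_cons, Option.bind_some] at h
    cases hp : pvProbeKey t0 e with
    | none => rw [hp] at h; rw [fold_bind_none] at h; cases h
    | some t1 =>
      rw [hp] at h
      have h2 := ih t1 t' h
      have h3 := probeKey_entries hp
      exact h2.trans ((List.Perm.append_left es h3).trans List.perm_middle)


theorem resize_entries {es : List Int} {ns : Nat} {t' : List (Option Int)}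
    (h : pvResize es ns = some t') : (t'.filterMap id).Perm es := by
  have := resize_entries_aux es (List.replicate ns none) t' h
  simpa using this


theorem setAdd_entries {st : List (Option Int) × Nat} {k : Int} {st' : List (Option Int) × Nat}
    (h : pvSetAdd st k = some st') :
    (st'.1.filterMap id).Perm (k :: st.1.filterMap id) := by
  unfold pvSetAdd at h
  cases hp : pvProbeKey st.1 k with
  | none => simp [hp] at h
  | some t =>
    simp only [hp] at h
    have h3 := probeKey_entries hp
    split at h
    · split at h
      next => cases h
      next t' hr =>
        cases h
        exact (resize_entries hr).trans h3
    · cases h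
      exact h3


theorem fold_setAdd_entries (D : List Int) : ∀ (st0 st' : List (Option Int) × Nat),
    D.foldl (fun acc x => acc.bind fun st => pvSetAdd st x) (some st0) = some st' →
    (st'.1.filterMap id).Perm (D ++ st0.1.filterMap id) := by
  induction D with
  | nil => intro st0 st' h; cases h; simp
  | cons d D ih =>
    intro st0 st' h
    simp only [List.foldl_cons, Option.bind_some] at h
    cases hp : pvSetAdd st0 d with
    | none => rw [hp] at h; rw [fold_bind_none] at h; cases h
    | some st1 =>
      rw [hp] at h
      exact (ih st1 st' h).trans ((List.Perm.append_left D (setAdd_entries hp)).trans List.perm_middle)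


theorem pySetList_perm (l : List Int) : (pySetList l).Perm (PySem.Set.ofList l) := by
  unfold pySetList
  simp only
  split
  · rename_i t f h
    have := fold_setAdd_entries (PySem.Set.ofList l) (List.replicate 8 none, 0) (t, f) h
    simpa using this
  · exact List.Perm.refl _


theorem pySetList_nodup (l : List Int) : (pySetList l).Nodup :=
  ((pySetList_perm l).nodup_iff).mpr (PySem.Set.nodup_ofList l)

theorem mem_pySetList {l : List Int} {x : Int} (h : x ∈ l) : x ∈ pySetList l :=
  ((pySetList_perm l).mem_iff).mpr ((PySem.Set.mem_ofList l x).mpr h)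

-- ---- permutations ----

theorem permsFuel_ne_nil : ∀ (n : Nat) (xs : List Int), xs.length = n → permsFuel n xs ≠ [] := by
  intro n
  induction n with
  | zero => intro xs h; simp [permsFuel]
  | succ n ih =>
    intro xs h
    unfold permsFuel
    cases xs with
    | nil => simp at h
    | cons a t =>
      have ht : t.length = n := by simp at h; omega
      have h0 : permsFuel n ((a :: t).eraseIdx 0) ≠ [] := by
        apply ih; simpa using ht
      have hr : List.range (a :: t).length = 0 :: (List.range t.length).map Nat.succ := by
        simp [List.range_succ_eq_map]
      rw [hr, List.flatMap_cons]
      intro hcon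
      rcases List.append_eq_nil_iff.mp hcon with ⟨h1, _⟩
      exact h0 (List.map_eq_nil_iff.mp h1)

theorem permsFuel_mem_length : ∀ (n : Nat) (xs p : List Int), xs.length = n →
    p ∈ permsFuel n xs → p.length = n := by
  intro n
  induction n with
  | zero => intro xs p h hp; simp [permsFuel] at hp; simp [hp]
  | succ n ih =>
    intro xs p h hp
    unfold permsFuel at hp
    rw [List.mem_flatMap] at hp
    obtain ⟨i, hi, hq⟩ := hp
    rw [List.mem_map] at hq
    obtain ⟨q, hq, rfl⟩ := hq
    rw [List.mem_range] at hi
    have hlen : (xs.eraseIdx i).length = n := by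
      rw [List.length_eraseIdx_of_lt (by omega)]; omega
    simp [ih _ _ hlen hq]

theorem permsList_ne_nil (xs : List Int) : permsList xs ≠ [] :=
  permsFuel_ne_nil xs.length xs rfl

theorem permsList_mem_length {xs p : List Int} (h : p ∈ permsList xs) : p.length = xs.length :=
  permsFuel_mem_length xs.length xs p rfl h

-- ---- loop shapes: a `for i in range(len(xs))` that reads xs[i] is a fold over xs ----

theorem foldl_range_getD {γ σ : Type} (xs : List γ) (d : γ) (g : σ → γ → σ) (a : σ) :
    (List.range xs.length).foldl (fun st i => g st (xs.getD i d)) a = xs.foldl g a := by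
  induction xs using List.reverseRecOn generalizing a with
  | nil => simp
  | append_singleton ys y ih =>
    have hl : (ys ++ [y]).length = ys.length + 1 := by simp
    rw [hl, List.range_succ, List.foldl_append, List.foldl_append]
    have hcon : (List.range ys.length).foldl (fun st i => g st ((ys ++ [y]).getD i d)) a
        = (List.range ys.length).foldl (fun st i => g st (ys.getD i d)) a := by
      apply PySem.List.foldl_congr_mem
      intro acc i hi
      rw [List.mem_range] at hi
      rw [List.getD_eq_getElem?_getD, List.getD_eq_getElem?_getD, List.getElem?_append_left hi]
    rw [hcon, ih]
    simp

theorem foldl_range_getD2 {γ δ σ : Type} (xs : List γ) (ys : List δ)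
    (h : xs.length ≤ ys.length) (dx : γ) (dy : δ) (g : σ → γ → δ → σ) (a : σ) :
    (List.range xs.length).foldl (fun st i => g st (xs.getD i dx) (ys.getD i dy)) a
      = (xs.zip ys).foldl (fun st p => g st p.1 p.2) a := by
  have hz : (xs.zip ys).length = xs.length := by rw [List.length_zip]; omega
  have step : (List.range xs.length).foldl (fun st i => g st (xs.getD i dx) (ys.getD i dy)) a
      = (List.range (xs.zip ys).length).foldl
          (fun st i => g st (((xs.zip ys).getD i (dx, dy)).1) (((xs.zip ys).getD i (dx, dy)).2)) a := by
    rw [hz]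
    apply PySem.List.foldl_congr_mem
    intro acc i hi
    rw [List.mem_range] at hi
    have hiz : i < (xs.zip ys).length := by omega
    have h1 : (xs.zip ys).getD i (dx, dy) = (xs.zip ys)[i] := List.getD_eq_getElem _ _ hiz
    have h2 : (xs.zip ys)[i] = (xs[i]'(by omega), ys[i]'(by omega)) := List.getElem_zip
    rw [h1, h2, List.getD_eq_getElem _ _ hi, List.getD_eq_getElem _ _ (by omega : i < ys.length)]
  rw [step]
  exact foldl_range_getD (xs.zip ys) (dx, dy) (fun st p => g st p.1 p.2) a

-- ---- A's j-loop: the k replacement passes apply the permutation pointwise ----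

theorem modA (classes comb labels : List Int) (hnd : classes.Nodup)
    (hm : ∀ x ∈ labels, x ∈ classes) :
    ∀ j, j ≤ classes.length →
    (List.range j).foldl (fun m jj =>
        m.map fun x => if x = Sum.inl (classes.getD jj 0) then Sum.inr (comb.getD jj 0) else x)
      (labels.map (Sum.inl) : List (Int ⊕ Int))
    = labels.map (fun x => if classes.idxOf x < j then Sum.inr (comb.getD (classes.idxOf x) 0)
        else Sum.inl x) := by
  intro j hj
  induction j with
  | zero => simp
  | succ j ih =>
    have hjlt : j < classes.length := by omega
    rw [List.range_succ, List.foldl_append, ih (by omega)]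
    simp only [List.foldl_cons, List.foldl_nil, List.map_map]
    apply List.map_congr_left
    intro x hx
    have hxc : x ∈ classes := hm x hx
    have hidx : classes.idxOf x < classes.length := List.idxOf_lt_length_of_mem hxc
    have hgetx : classes[classes.idxOf x] = x := List.getElem_idxOf hidx
    simp only [Function.comp_apply]
    by_cases hlt : classes.idxOf x < j
    · rw [if_pos hlt, if_neg (by simp), if_pos (by omega)]
    · rw [if_neg hlt]
      have hgd : classes.getD j 0 = classes[j] := List.getD_eq_getElem _ _ hjlt
      by_cases hx2 : x = classes[j]
      · have hij : classes.idxOf x = j := by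
          have h2 : classes[classes.idxOf x] = classes[j] := hgetx.trans hx2
          exact (List.Nodup.getElem_inj_iff hnd).mp h2
        rw [if_pos (by rw [hgd, hx2]), if_pos (by omega), hij]
      · have hgdx : classes.getD (classes.idxOf x) 0 = x := by
          rw [List.getD_eq_getElem _ _ hidx]; exact hgetx
        have hij : classes.idxOf x ≠ j := by
          intro hc
          have h2 : classes.getD j 0 = x := by rw [← hc]; exact hgdx
          exact hx2 (h2.symm.trans hgd)
        rw [if_neg (by rw [hgd]; exact fun hc => hx2 (Sum.inl.inj hc)), if_neg (by omega)]

theorem modLA (classes comb labels : List Int) (hnd : classes.Nodup)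
    (hm : ∀ x ∈ labels, x ∈ classes) :
    pvModLabels classes comb labels = labels.map (pvMapv classes comb) := by
  unfold pvModLabels pvModPass
  rw [modA classes comb labels hnd hm classes.length (le_refl _), List.map_map]
  apply List.map_congr_left
  intro x hx
  have hidx : classes.idxOf x < classes.length := List.idxOf_lt_length_of_mem (hm x hx)
  simp only [Function.comp_apply, if_pos hidx]
  rfl

-- ---- A's accuracy loop counts matches ----

theorem countA (classes comb labels orig : List Int) (hpre : labels.length ≤ orig.length) :
    pvCount (labels.map (pvMapv classes comb)) orig
    = (pvMatchN classes comb labels orig : Int) := by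
  unfold pvCount
  have hlen : (labels.map (pvMapv classes comb)).length = labels.length := by simp
  have hc : (List.range (labels.map (pvMapv classes comb)).length).foldl (fun (c : Int) k =>
        if (labels.map (pvMapv classes comb)).getD k 0
            = (PySem.List.pyGet? orig (k : Int)).getD 0 then c + 1 else c) 0
      = (List.range (labels.map (pvMapv classes comb)).length).foldl (fun (c : Int) k =>
        if (labels.map (pvMapv classes comb)).getD k 0 = orig.getD k 0 then c + 1 else c) 0 := by
    apply PySem.List.foldl_congr_mem
    intro acc k hk
    rw [PySem.List.pyGet?_natCast, ← List.getD_eq_getElem?_getD]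
  rw [hc, foldl_range_getD2 _ _ (by omega) 0 0 (fun (c : Int) x y => if x = y then c + 1 else c) 0,
    PySem.List.foldl_ite_add_one (fun p : Int × Int => p.1 = p.2)]
  rw [List.zip_map_left, List.countP_map]
  simp only [zero_add, Int.natCast_inj]
  apply List.countP_congr
  intro p _
  simp [pvMapv, Prod.map]

-- ---- A's i-loop builds the two rows as maps ----

theorem rowsA {α : Type} (f : α → Int) (h : α → List Int) (ps : List α) :
    ∀ (a : List Int) (b : List (List Int)),
    ps.foldl (fun st c => (st.1 ++ [f c], st.2 ++ [h c])) (a, b)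
      = (a ++ ps.map f, b ++ ps.map h) := by
  induction ps with
  | nil => simp
  | cons c ps ih => intro a b; rw [List.foldl_cons, ih]; simp

-- ---- B's index dict is idxOf ----

theorem indexDict_getD (classes : List Int) (hnd : classes.Nodup) :
    ∀ x ∈ classes,
    (pvIndexDict classes).getD x 0 = (classes.idxOf x : Int) := by
  unfold pvIndexDict
  induction classes using List.reverseRecOn with
  | nil => intro x hx; simp at hx
  | append_singleton ys y ih =>
    intro x hx
    have hnd' : ys.Nodup := (List.nodup_append.mp hnd).1
    have hy : y ∉ ys := by
      have hd := (List.nodup_append.mp hnd).2.2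
      intro hc
      exact hd y hc y (List.mem_singleton_self y) rfl
    rw [PySem.List.enumerate_append, List.foldl_append]
    simp only [PySem.List.enumerate, List.foldl_cons, List.foldl_nil]
    by_cases hxy : x = y
    · subst hxy
      rw [PySem.Dict.getD_insert_self, List.idxOf_append, if_neg hy]
      simp
    · rw [PySem.Dict.getD_insert_of_ne _ _ _ hxy]
      have hxys : x ∈ ys := by
        rcases List.mem_append.mp hx with h | h
        · exact h
        · simp at h; exact absurd h hxy
      rw [ih hnd' x hxys, List.idxOf_append]
      simp [hxys]

-- ---- B's confusion counter and O(k) leaf score ----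

theorem confB (classes labels orig : List Int) (hnd : classes.Nodup)
    (hm : ∀ x ∈ labels, x ∈ classes) :
    pvConf (pvIndexDict classes) labels orig
    = PySem.Dict.counter ((labels.zip orig).map (fun p => ((classes.idxOf p.1 : Int), p.2))) := by
  unfold pvConf
  have h2 : (labels.zip orig).foldl (fun d xy =>
        d.insert ((classes.idxOf xy.1 : Int), xy.2)
          (d.getD ((classes.idxOf xy.1 : Int), xy.2) 0 + 1)) PySem.Dict.empty
      = PySem.Dict.counter ((labels.zip orig).map
          (fun p => ((classes.idxOf p.1 : Int), p.2))) := by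
    rw [← PySem.Dict.foldl_insert_getD_add_one_eq_counter, List.foldl_map]
  refine Eq.trans ?_ h2
  apply PySem.List.foldl_congr_mem
  intro acc xy hxy
  rw [indexDict_getD classes hnd xy.1 (hm _ (List.of_mem_zip hxy).1)]

theorem countP_mem_cons {γ : Type} [BEq γ] [LawfulBEq γ] (pairs : List γ) (e : γ) (L : List γ)
    (he : e ∉ L) :
    pairs.countP (fun p => decide (p ∈ e :: L))
      = pairs.count e + pairs.countP (fun p => decide (p ∈ L)) := by
  induction pairs with
  | nil => simp
  | cons p ps ih =>
    simp only [List.countP_cons, List.count_cons, ih]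
    by_cases hpe : p = e
    · subst hpe
      simp [he]
      omega
    · have h1 : (p ∈ e :: L) ↔ (p ∈ L) := by
        simp [List.mem_cons, hpe]
      by_cases hpl : p ∈ L
      · simp [h1, hpl, hpe]
        omega
      · simp [h1, hpl, hpe]

theorem sum_counts {γ : Type} [BEq γ] [LawfulBEq γ] (pairs : List γ) : ∀ (L : List γ), L.Nodup →
    ∀ (c : Int), L.foldl (fun (s : Int) e => s + (pairs.count e : Int)) c
      = c + (pairs.countP (fun p => decide (p ∈ L)) : Int) := by
  intro L
  induction L with
  | nil => intro _ c; simp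
  | cons e L ih =>
    intro hL c
    have he : e ∉ L := (List.nodup_cons.mp hL).1
    rw [List.foldl_cons, ih (List.nodup_cons.mp hL).2 _, countP_mem_cons pairs e L he]
    push_cast
    ring

theorem scoreB (classes comb labels orig : List Int) (_hnd : classes.Nodup)
    (hm : ∀ x ∈ labels, x ∈ classes) (hk : comb.length = classes.length) :
    pvScore (PySem.Dict.counter ((labels.zip orig).map
        (fun p => ((classes.idxOf p.1 : Int), p.2)))) comb
    = (pvMatchN classes comb labels orig : Int) := by
  unfold pvScore
  have h1 : (PySem.List.enumerate comb).foldl (fun (s : Int) jv =>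
        s + (PySem.Dict.counter ((labels.zip orig).map
            (fun p => ((classes.idxOf p.1 : Int), p.2)))).getD (jv.1, jv.2) 0) 0
      = (PySem.List.enumerate comb).foldl (fun (s : Int) jv =>
        s + (((labels.zip orig).map (fun p => ((classes.idxOf p.1 : Int), p.2))).count jv : Int)) 0 := by
    apply PySem.List.foldl_congr_mem
    intro acc jv _
    rw [show ((jv.1, jv.2) : Int × Int) = jv from rfl, PySem.Dict.getD_counter]
  have hnde : (PySem.List.enumerate comb (0 : Int)).Nodup := by
    apply List.Pairwise.imp _ (PySem.List.pairwise_lt_enumerate comb 0)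
    intro a b hlt heq
    rw [heq] at hlt
    exact lt_irrefl _ hlt
  rw [h1, sum_counts _ _ hnde 0, List.countP_map, zero_add]
  unfold pvMatchN
  rw [Int.natCast_inj]
  apply List.countP_congr
  intro p hp
  have hx1 : p.1 ∈ labels := (List.of_mem_zip hp).1
  have hidx : classes.idxOf p.1 < comb.length := by
    rw [hk]; exact List.idxOf_lt_length_of_mem (hm _ hx1)
  simp only [Function.comp_apply, decide_eq_true_eq, beq_iff_eq]
  rw [PySem.List.mem_enumerate_iff]
  constructor
  · rintro ⟨k, hklt, hpk⟩
    have h2 : (classes.idxOf p.1 : Int) = 0 + (k : Int) := congrArg Prod.fst hpk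
    have h3 : (classes.idxOf p.1) = k := by omega
    subst h3
    have h4 : p.2 = comb[classes.idxOf p.1] := congrArg Prod.snd hpk
    rw [pvMapv, List.getD_eq_getElem _ _ hidx, h4]
  · intro hv
    refine ⟨classes.idxOf p.1, hidx, ?_⟩
    rw [pvMapv, List.getD_eq_getElem _ _ hidx] at hv
    rw [← hv]
    simp

-- ---- B's depth-first search = the first-strict-improvement fold over the permutation list ----

theorem foldl_enum {γ σ : Type} (xs : List γ) (d : γ) (G : σ → Nat → γ → σ) (a : σ) :
    (PySem.List.enumerate xs).foldl (fun st p => G st p.1.toNat p.2) a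
      = (List.range xs.length).foldl (fun st i => G st i (xs.getD i d)) a := by
  rw [PySem.List.enumerate_eq_map_pyRange xs d, List.foldl_map,
    PySem.List.pyRange_one, List.foldl_map]
  simp only [Int.sub_zero, Int.toNat_natCast, Int.zero_add]
  apply PySem.List.foldl_congr_mem
  intro acc k hk
  rw [PySem.List.pyGetD_natCast]

theorem goF_eq (conf : PySem.Dict (Int × Int) Int) :
    ∀ (n : Nat) (rem pfx : List Int) (st : Int × Option (List Int)), rem.length = n →
    pvGoF conf n pfx rem st
      = (permsFuel n rem).foldl (fun st p =>
          if pvScore conf (pfx ++ p) > st.1 then (pvScore conf (pfx ++ p), some (pfx ++ p))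
          else st) st := by
  intro n
  induction n with
  | zero =>
    intro rem pfx st _
    simp [pvGoF, permsFuel]
  | succ n ih =>
    intro rem pfx st hlen
    unfold pvGoF permsFuel
    rw [foldl_enum rem 0 (fun st i x => pvGoF conf n (pfx ++ [x]) (rem.eraseIdx i) st) st,
      List.foldl_flatMap]
    apply PySem.List.foldl_congr_mem
    intro acc i hi
    rw [List.mem_range] at hi
    have hlen' : (rem.eraseIdx i).length = n := by
      rw [List.length_eraseIdx_of_lt (by omega)]; omega
    rw [ih (rem.eraseIdx i) (pfx ++ [rem.getD i 0]) acc hlen', List.foldl_map]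
    apply PySem.List.foldl_congr_mem
    intro acc2 p _
    simp

theorem goB (conf : PySem.Dict (Int × Int) Int) (classes : List Int)
    (st : Int × Option (List Int)) :
    pvGo conf [] classes st
      = (permsList classes).foldl (fun st p =>
          if pvScore conf p > st.1 then (pvScore conf p, some p) else st) st := by
  unfold pvGo permsList
  rw [goF_eq conf classes.length classes [] st rfl]
  simp only [List.nil_append]

-- ---- first-strict-improvement fold = first index of the maximum ----

theorem pvNoImp {α β : Type} (f : α → Int) (u : α → β) :
    ∀ (ps : List α) (bs : Int) (w : β), (∀ p ∈ ps, f p ≤ bs) →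
    ps.foldl (fun st p => if f p > st.1 then (f p, u p) else st) (bs, w) = (bs, w)
    ∧ (ps.map f).foldl max bs = bs := by
  intro ps
  induction ps with
  | nil => intro bs w _; simp
  | cons p rest ih =>
    intro bs w h
    have hp : f p ≤ bs := h p List.mem_cons_self
    have hrest : ∀ q ∈ rest, f q ≤ bs := fun q hq => h q (List.mem_cons_of_mem _ hq)
    have hmax : max bs (f p) = bs := max_eq_left hp
    constructor
    · rw [List.foldl_cons, if_neg (by omega)]
      exact (ih bs w hrest).1
    · rw [List.map_cons, List.foldl_cons, hmax]
      exact (ih bs w hrest).2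

theorem pvSel {α β : Type} (f : α → Int) (u : α → β) (d : α) :
    ∀ (ps : List α) (bs : Int) (w : β), (∃ p ∈ ps, bs < f p) →
    ps.foldl (fun st p => if f p > st.1 then (f p, u p) else st) (bs, w)
    = ((ps.map f).foldl max bs,
       u (ps.getD ((ps.map f).idxOf ((ps.map f).foldl max bs)) d)) := by
  intro ps
  induction ps with
  | nil => rintro bs w ⟨p, hp, _⟩; simp at hp
  | cons p rest ih =>
    intro bs w hex
    rw [List.foldl_cons, List.map_cons, List.foldl_cons]
    by_cases hpb : f p > bs
    · rw [if_pos hpb]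
      have hmaxbs : max bs (f p) = f p := max_eq_right (le_of_lt hpb)
      rw [hmaxbs]
      by_cases himp : ∃ q ∈ rest, f p < f q
      · rw [ih (f p) (u p) himp]
        obtain ⟨q, hq, hfq⟩ := himp
        have hM : f p < (rest.map f).foldl max (f p) :=
          lt_of_lt_of_le hfq ((PySem.List.le_foldl_max (rest.map f) (f p)).2 (f q)
            (List.mem_map_of_mem hq))
        rw [List.idxOf_cons]
        have : (f p == (rest.map f).foldl max (f p)) = false := by
          simp; omega
        rw [this]
        simp only [cond_false, List.getD_cons_succ]
      · push Not at himp
        have hni := pvNoImp f u rest (f p) (u p) himp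
        rw [hni.1, hni.2, List.idxOf_cons]
        simp
    · rw [if_neg hpb]
      have hple : f p ≤ bs := by omega
      have hmaxbs : max bs (f p) = bs := max_eq_left hple
      rw [hmaxbs]
      obtain ⟨q, hq, hbq⟩ := hex
      have hqrest : q ∈ rest := by
        rcases List.mem_cons.mp hq with h | h
        · exfalso; rw [h] at hbq; omega
        · exact h
      rw [ih bs w ⟨q, hqrest, hbq⟩]
      have hM : bs < (rest.map f).foldl max bs :=
        lt_of_lt_of_le hbq ((PySem.List.le_foldl_max (rest.map f) bs).2 (f q)
          (List.mem_map_of_mem hqrest))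
      rw [List.idxOf_cons]
      have : (f p == (rest.map f).foldl max bs) = false := by
        simp; omega
      rw [this]
      simp only [cond_false, List.getD_cons_succ]

theorem idxOf?_getD_of_mem {l : List Int} {v : Int} (h : v ∈ l) :
    (l.idxOf? v).getD 0 = l.idxOf v := by
  induction l with
  | nil => simp at h
  | cons b l ih =>
    rw [List.idxOf?_cons, List.idxOf_cons]
    by_cases hbv : b = v
    · simp [hbv]
    · have hvl : v ∈ l := by
        rcases List.mem_cons.mp h with h' | h'
        · exact absurd h'.symm hbv
        · exact h'
      have h1 : (b == v) = false := by simp [hbv]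
      rw [h1]
      simp only [Bool.false_eq_true, if_false, cond_false]
      cases hio : l.idxOf? v with
      | none =>
        exfalso
        exact absurd (List.idxOf?_eq_none_iff.mp hio) (by simpa using hvl)
      | some i =>
        have hi := ih hvl
        rw [hio] at hi
        simp at hi
        simp [hi]

-- ---- A's argmax bookkeeping picks the same index ----

theorem pickA (a : Int) (t : List Int) :
    (PySem.List.index? (a :: t) ((PySem.List.max? (a :: t) (fun y => y)).getD 0)).getD 0
      = (a :: t).idxOf (t.foldl max a) := by
  rw [PySem.List.max?_id_cons, Option.getD_some, PySem.List.index?_eq_idxOf?]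
  exact idxOf?_getD_of_mem (PySem.List.max?_mem (PySem.List.max?_id_cons a t))

theorem cons_map_getElem {α β : Type} (f : α → β) (p0 : α) (rest : List α) (j : Nat)
    (hj : j < (p0 :: rest).length) (hj2 : j < (f p0 :: rest.map f).length) :
    (f p0 :: rest.map f)[j] = f ((p0 :: rest)[j]) := by
  have h : f p0 :: rest.map f = (p0 :: rest).map f := rfl
  simp only [h, List.getElem_map]

-- ===== VERDICT (by name: the statement is the Claim_ definition above) =====
theorem Choose_best_color_spec : Claim_equal_Choose_best_color := by
  intro labels orig hdom hpre
  unfold Spec_Choose_best_color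
  unfold Pre_Choose_best_color at hpre
  clear hdom
  have hnd : (pySetList labels).Nodup := pySetList_nodup labels
  have hm : ∀ x ∈ labels, x ∈ pySetList labels := fun x hx => mem_pySetList hx
  have hpne : permsList (pySetList labels) ≠ [] := permsList_ne_nil (pySetList labels)
  have hlenp : ∀ p ∈ permsList (pySetList labels), p.length = (pySetList labels).length :=
    fun p hp => permsList_mem_length hp
  simp only [Choose_best_color, Choose_best_color_alt]
  -- A's i-loop over range(len(combinations)) is a fold over the permutations themselves
  have hrows : (List.range (permsList (pySetList labels)).length).foldl
      (fun (st : List Int × List (List Int)) i =>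
        (st.1 ++ [pvCount (pvModLabels (pySetList labels)
            ((permsList (pySetList labels)).getD i []) labels) orig],
         st.2 ++ [pvModLabels (pySetList labels)
            ((permsList (pySetList labels)).getD i []) labels])) ([], [])
      = ((permsList (pySetList labels)).map
          (fun c => pvCount (pvModLabels (pySetList labels) c labels) orig),
         (permsList (pySetList labels)).map
          (fun c => pvModLabels (pySetList labels) c labels)) := by
    refine (foldl_range_getD (permsList (pySetList labels)) []
      (fun st c => (st.1 ++ [pvCount (pvModLabels (pySetList labels) c labels) orig],
        st.2 ++ [pvModLabels (pySetList labels) c labels])) ([], [])).trans ?_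
    rw [rowsA]
    simp
  rw [hrows]
  -- pointwise: A's per-permutation relabelling and accuracy
  have hmaph : (permsList (pySetList labels)).map
      (fun c => pvModLabels (pySetList labels) c labels)
      = (permsList (pySetList labels)).map
          (fun c => labels.map (pvMapv (pySetList labels) c)) := by
    apply List.map_congr_left
    intro c _
    exact modLA _ c labels hnd hm
  have hmapf : (permsList (pySetList labels)).map
      (fun c => pvCount (pvModLabels (pySetList labels) c labels) orig)
      = (permsList (pySetList labels)).map
          (fun c => (pvMatchN (pySetList labels) c labels orig : Int)) := by
    apply List.map_congr_left
    intro c _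
    rw [modLA _ c labels hnd hm]
    exact countA _ c labels orig hpre
  rw [hmaph, hmapf]
  -- B: the confusion counter, then the DFS as the selection fold over the permutation list
  rw [confB _ labels orig hnd hm, goB]
  have hfold : (permsList (pySetList labels)).foldl
      (fun (st : Int × Option (List Int)) perm =>
        if pvScore (PySem.Dict.counter ((labels.zip orig).map
            (fun p => (((pySetList labels).idxOf p.1 : Int), p.2)))) perm > st.1
        then (pvScore (PySem.Dict.counter ((labels.zip orig).map
            (fun p => (((pySetList labels).idxOf p.1 : Int), p.2)))) perm, some perm)
        else st) (-1, none)
      = (permsList (pySetList labels)).foldl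
        (fun (st : Int × Option (List Int)) perm =>
          if (pvMatchN (pySetList labels) perm labels orig : Int) > st.1
          then ((pvMatchN (pySetList labels) perm labels orig : Int), some perm)
          else st) (-1, none) := by
    apply PySem.List.foldl_congr_mem
    intro acc perm hperm
    rw [scoreB _ perm labels orig hnd hm (hlenp perm hperm)]
  rw [hfold]
  obtain ⟨q, hq⟩ := List.exists_mem_of_ne_nil _ hpne
  have hsel := pvSel (fun c => (pvMatchN (pySetList labels) c labels orig : Int))
    some [] (permsList (pySetList labels)) (-1) none
    ⟨q, hq, by
      show (-1 : Int) < (pvMatchN (pySetList labels) q labels orig : Int)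
      have := Int.natCast_nonneg (pvMatchN (pySetList labels) q labels orig); omega⟩
  rw [hsel]
  simp only [Option.getD_some]
  -- B's output map is the relabelling by the winning permutation
  have hBout : ∀ (pstar : List Int),
      (labels.map fun x => pstar.getD ((pvIndexDict (pySetList labels)).getD x 0).toNat 0)
      = labels.map (pvMapv (pySetList labels) pstar) := by
    intro pstar
    apply List.map_congr_left
    intro x hx
    rw [indexDict_getD _ hnd x (hm x hx)]
    simp [pvMapv]
  rw [hBout]
  -- both sides now pick by the first index of the maximal accuracy
  cases hps : permsList (pySetList labels) with
  | nil => exact absurd hps hpne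
  | cons p0 rest =>
    simp only [List.map_cons, List.foldl_cons]
    rw [pickA]
    rw [max_eq_right (by
      have := Int.natCast_nonneg (pvMatchN (pySetList labels) p0 labels orig)
      omega : (-1 : Int) ≤ (pvMatchN (pySetList labels) p0 labels orig : Int))]
    have hMmem : ((List.map (fun c => (pvMatchN (pySetList labels) c labels orig : Int)) rest).foldl
        max ((pvMatchN (pySetList labels) p0 labels orig : Int)))
        ∈ ((pvMatchN (pySetList labels) p0 labels orig : Int) ::
           List.map (fun c => (pvMatchN (pySetList labels) c labels orig : Int)) rest) := by
      rcases PySem.List.foldl_max_mem (List.map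
          (fun c => (pvMatchN (pySetList labels) c labels orig : Int)) rest)
          ((pvMatchN (pySetList labels) p0 labels orig : Int)) with h | h
      · rw [h]; exact List.mem_cons_self
      · exact List.mem_cons_of_mem _ h
    have hjlt : ((pvMatchN (pySetList labels) p0 labels orig : Int) ::
        List.map (fun c => (pvMatchN (pySetList labels) c labels orig : Int)) rest).idxOf
          ((List.map (fun c => (pvMatchN (pySetList labels) c labels orig : Int)) rest).foldl
            max ((pvMatchN (pySetList labels) p0 labels orig : Int)))
        < (p0 :: rest).length := by
      have := List.idxOf_lt_length_of_mem hMmem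
      simpa using this
    rw [List.getD_eq_getElem _ _ (by simpa using hjlt), List.getD_eq_getElem _ _ hjlt]
    exact cons_map_getElem (fun c => List.map (pvMapv (pySetList labels) c) labels) p0 rest _
      hjlt (by simpa using hjlt)
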